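-- pv_equiv track=rewrite | github.com/manoldonev/algo-challenges | challenges_2020/greedy_florist.py | get_minimum_cost
-- ===== SOURCE A (Python) =====
-- def get_minimum_cost(k, costs):
--     """https://www.hackerrank.com/challenges/greedy-florist/"""
--
--     purchased_flowers = [0] * k
--     minimum_cost = 0
--     for original_price in sorted(costs, reverse=True):
--         purchase_amount, buyer_index = _calculate_next_purchase(
--             purchased_flowers, original_price)
--         purchased_flowers[buyer_index] += 1
--         minimum_cost += purchase_amount
--
--     return minimum_cost
--
-- def _calculate_next_purchase(purchased_flowers, cost):
--     return min(((value + 1) * cost, index)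
--                for index, value in enumerate(purchased_flowers))
-- ===== SOURCE B (Python) =====
-- def get_minimum_cost(k, costs):
--     """Sort prices descending; the j-th flower bought overall costs
--     (j // k + 1) times its price, since the k buyers take turns."""
--     total = 0
--     for j, price in enumerate(sorted(costs, reverse=True)):
--         total += (j // k + 1) * price
--     return total
-- ===== Notes on version B (the rewrite author's own statement) =====
-- stated objective: simpler
-- what changed: Replaced the O(n*k) simulation (a min() scan over all k buyers per flower) by the direct closed form: after sorting descending the j-th flower costs (j//k+1) times its price; Pre_ keeps the problem's stated domain of nonnegative prices (plus k=1, where any prices give the same value) and excludes negative prices with k>=2 (no greedy is specified there; A's pile-on-one-buyer and B's round-robin values are equally defensible) and k<=0 with nonempty costs (A raises ValueError).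
-- outside the precondition, e.g. on get_minimum_cost(2, [-1, -1, -1]): A returns -6, B returns -4; on get_minimum_cost(0, [5]): A raises ValueError, B raises ZeroDivisionError
import Mathlib
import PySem

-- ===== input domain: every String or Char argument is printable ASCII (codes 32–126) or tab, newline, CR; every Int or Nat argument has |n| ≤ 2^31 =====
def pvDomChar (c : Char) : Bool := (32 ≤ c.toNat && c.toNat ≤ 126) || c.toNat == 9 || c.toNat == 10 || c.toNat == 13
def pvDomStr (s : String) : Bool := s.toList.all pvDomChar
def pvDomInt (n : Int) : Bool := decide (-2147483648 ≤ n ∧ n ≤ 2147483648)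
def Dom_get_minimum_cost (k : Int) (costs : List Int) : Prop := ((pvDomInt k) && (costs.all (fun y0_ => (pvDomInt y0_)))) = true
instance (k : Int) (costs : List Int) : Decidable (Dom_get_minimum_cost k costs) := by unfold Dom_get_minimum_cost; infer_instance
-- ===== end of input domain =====

-- B replaces A's per-flower min() scan over all k buyers by the closed form (j//k+1)·price over the descending sort (objective: simpler; asymptotically lighter, though a timing run's inputs fall outside Pre_).

-- ===== PORT A =====
-- Python's tuple comparison: does x beat the current minimum m?
def pvBetter (x m : Int × Int) : Bool :=
  decide (x.1 < m.1) || (!decide (m.1 < x.1) && decide (x.2 < m.2))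

def pvPick (acc : Option (Int × Int)) (x : Int × Int) : Option (Int × Int) :=
  match acc with
  | none => some x
  | some m => if pvBetter x m then some x else some m

-- min(((value + 1) * cost, index) for index, value in enumerate(purchased_flowers)):
-- a single running-minimum pass over the generator, carrying the enumerate counter
def pvMinPurchase (purchased_flowers : List Int) (cost : Int) : Option (Int × Int) :=
  (purchased_flowers.foldl
    (fun (st : Int × Option (Int × Int)) v => (st.1 + 1, pvPick st.2 ((v + 1) * cost, st.1)))
    (0, none)).2

-- the 'for original_price in sorted(costs, reverse=True)' loop; none = the min() raised (empty buyer list)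
def pvALoop : List Int → List Int → Int → Option Int
  | [], _, acc => some acc
  | c :: rest, purchased_flowers, acc =>
    match pvMinPurchase purchased_flowers c with
    | none => none
    | some (amt, idx) =>
        pvALoop rest
          (PySem.List.pySetD purchased_flowers idx (PySem.List.pyGetD purchased_flowers idx 0 + 1))
          (acc + amt)

def get_minimum_cost (k : Int) (costs : List Int) : Int :=
  (pvALoop (PySem.List.sorted costs (fun x => x) true) (PySem.List.pyRepeat [0] k) 0).getD 0

-- ===== PORT B =====
def get_minimum_cost_alt (k : Int) (costs : List Int) : Int :=
  (PySem.List.enumerate (PySem.List.sorted costs (fun x => x) true)).foldl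
    (fun total p => total + (PySem.Int.floordiv p.1 k + 1) * p.2) 0

-- ===== PRECONDITION & SPEC =====
-- Pre_ keeps the problem's stated domain, nonnegative prices (k = 1 is also kept: with one buyer
-- any price list gives the same value); on negative prices with several buyers no greedy is
-- specified and A's pile-on-one-buyer assignment and B's round-robin assignment are equally
-- defensible, so those corners are excluded; k ≤ 0 with nonempty costs is excluded because A
-- raises ValueError (min() of an empty sequence).
def Pre_get_minimum_cost (k : Int) (costs : List Int) : Prop :=
  (costs = [] ∨ 1 ≤ k) ∧ (k = 1 ∨ ∀ c ∈ costs, 0 ≤ c)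
instance (k : Int) (costs : List Int) : Decidable (Pre_get_minimum_cost k costs) := by
  unfold Pre_get_minimum_cost; infer_instance

def pvWitness_get_minimum_cost : Int × List Int := (2, [3, 1, 2, 0])

def Spec_get_minimum_cost (k : Int) (costs : List Int) (out : Int) : Prop := out = get_minimum_cost_alt k costs
instance (k : Int) (costs : List Int) (out : Int) : Decidable (Spec_get_minimum_cost k costs out) := by
  unfold Spec_get_minimum_cost; infer_instance

-- ===== CLAIM (what is proved, stated in full; the proofs are below) =====
def Claim_equal_get_minimum_cost : Prop := ∀ (k : Int) (costs : List Int), Dom_get_minimum_cost k costs → Pre_get_minimum_cost k costs → Spec_get_minimum_cost k costs (get_minimum_cost k costs)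

-- ===== LEMMAS AND PROOFS =====

-- the balanced buyer state after j purchases at positive prices: buyer i holds j/K (+1 for the first j%K buyers)
def pvBal (K j : Nat) : List Int :=
  (List.range K).map (fun i => ((j / K : Nat) : Int) + if i < j % K then 1 else 0)

theorem pvMin2_eq_foldl_pick (xs : List (Int × Int)) :
    PySem.List.min2? xs (fun q => q.1) (fun q => q.2) = xs.foldl pvPick none := by
  unfold PySem.List.min2?
  congr 1
  funext acc x
  cases acc with
  | none => rfl
  | some m => simp [pvPick, pvBetter]

theorem pvMinPurchase_eq_min2? (pf : List Int) (c : Int) :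
    pvMinPurchase pf c
      = PySem.List.min2? ((PySem.List.enumerate pf).map (fun p => ((p.2 + 1) * c, p.1)))
          (fun q => q.1) (fun q => q.2) := by
  rw [pvMin2_eq_foldl_pick]
  have key : ∀ (l : List Int) (s : Int) (acc : Option (Int × Int)),
      (l.foldl (fun (st : Int × Option (Int × Int)) v => (st.1 + 1, pvPick st.2 ((v + 1) * c, st.1)))
        (s, acc)).2
      = ((PySem.List.enumerate l s).map (fun p => ((p.2 + 1) * c, p.1))).foldl pvPick acc := by
    intro l
    induction l with
    | nil => intro s acc; rfl
    | cons v t ih =>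
      intro s acc
      rw [PySem.List.enumerate_cons, List.map_cons, List.foldl_cons, List.foldl_cons, ← ih (s + 1)]
  exact key pf 0 none

theorem pvFoldl_pick_mem (l : List (Int × Int)) (m : Int × Int) :
    ∃ m', l.foldl pvPick (some m) = some m' ∧ m' ∈ m :: l := by
  induction l generalizing m with
  | nil => exact ⟨m, rfl, by simp⟩
  | cons a t ih =>
    simp only [List.foldl_cons]
    cases hb : pvBetter a m with
    | true =>
      obtain ⟨m', h1, h2⟩ := ih a
      exact ⟨m', by simpa [pvPick, hb] using h1, by
        rcases List.mem_cons.mp h2 with h | h <;> simp [h]⟩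
    | false =>
      obtain ⟨m', h1, h2⟩ := ih m
      exact ⟨m', by simpa [pvPick, hb] using h1, by
        rcases List.mem_cons.mp h2 with h | h <;> simp [h]⟩

theorem pvFoldl_pick_keep (l : List (Int × Int)) (p : Int × Int)
    (h : ∀ q ∈ l, pvBetter q p = false) : l.foldl pvPick (some p) = some p := by
  induction l with
  | nil => rfl
  | cons a t ih =>
    have ha := h a (by simp)
    simp only [List.foldl_cons, pvPick, ha]
    exact ih (fun q hq => h q (by simp [hq]))

theorem pvMin2_pre_post (pre post : List (Int × Int)) (p : Int × Int)
    (hpre : ∀ q ∈ pre, p.1 < q.1) (hpost : ∀ q ∈ post, pvBetter q p = false) :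
    PySem.List.min2? (pre ++ p :: post) (fun q => q.1) (fun q => q.2) = some p := by
  rw [pvMin2_eq_foldl_pick]
  cases pre with
  | nil =>
    simp only [List.nil_append, List.foldl_cons]
    exact pvFoldl_pick_keep post p hpost
  | cons a pre' =>
    simp only [List.cons_append, List.foldl_cons]
    show (pre' ++ p :: post).foldl pvPick (some a) = some p
    obtain ⟨m', h1, h2⟩ := pvFoldl_pick_mem pre' a
    rw [List.foldl_append, h1, List.foldl_cons]
    have hm : pvPick (some m') p = some p := by
      have : p.1 < m'.1 := hpre m' (by rcases List.mem_cons.mp h2 with h | h <;> simp [h])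
      simp [pvPick, pvBetter, this]
    rw [hm]
    exact pvFoldl_pick_keep post p hpost

-- pairs list fed to min() when the buyer state is (range K).map g
theorem pvPairs_eq (K : Nat) (g : Nat → Int) (c : Int) :
    (PySem.List.enumerate ((List.range K).map g)).map (fun p => ((p.2 + 1) * c, p.1))
      = (List.range K).map (fun i => ((g i + 1) * c, (i : Int))) := by
  apply List.ext_getElem?
  intro n
  simp [PySem.List.getElem?_enumerate, List.getElem?_map]
  by_cases h : n < K <;> simp [h]

theorem pvStepPos (K j : Nat) (hK : 0 < K) (c : Int) (hc : 0 < c) :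
    pvMinPurchase (pvBal K j) c
      = some ((((j / K : Nat) : Int) + 1) * c, ((j % K : Nat) : Int)) := by
  have hr : j % K < K := Nat.mod_lt _ hK
  set q : Nat := j / K with hq
  set r : Nat := j % K with hrdef
  rw [pvMinPurchase_eq_min2?]
  unfold pvBal
  rw [pvPairs_eq]
  have hKsplit : K = r + (K - r) := by omega
  obtain ⟨m, hm⟩ : ∃ m, K - r = m + 1 := ⟨K - r - 1, by omega⟩
  have hlist : (List.range K).map
        (fun i => ((((q : Nat) : Int) + (if i < r then (1:Int) else 0) + 1) * c, (i : Int)))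
      = (List.range r).map (fun (i : Nat) => ((((q:Nat):Int) + 2) * c, (i : Int)))
        ++ ((((q:Nat):Int) + 1) * c, ((r:Nat) : Int))
          :: (List.range m).map (fun (i : Nat) => ((((q:Nat):Int) + 1) * c, ((r + (i + 1) : Nat) : Int))) := by
    conv_lhs => rw [hKsplit]
    rw [List.range_add, hm, List.range_succ_eq_map, List.map_append, List.map_map,
      List.map_cons, List.map_map]
    congr 1
    · apply List.map_congr_left
      intro i hi
      rw [List.mem_range] at hi
      rw [if_pos hi]
      norm_num
      left
      ring
    · congr 1
      · simp
      · apply List.map_congr_left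
        intro i _
        have hnot : ¬ (r + Nat.succ i < r) := by omega
        simp only [Function.comp_apply, if_neg hnot, Nat.succ_eq_add_one]
        norm_num
  rw [hlist, pvMin2_pre_post]
  · intro x hx
    simp only [List.mem_map, List.mem_range] at hx
    obtain ⟨i, hi, rfl⟩ := hx
    have h2 : ((q:Nat):Int) + 1 < ((q:Nat):Int) + 2 := by linarith
    exact mul_lt_mul_of_pos_right h2 hc
  · intro x hx
    simp only [List.mem_map, List.mem_range] at hx
    obtain ⟨i, hi, rfl⟩ := hx
    simp only [pvBetter]
    have h1 : ¬ ((((q:Nat):Int) + 1) * c < (((q:Nat):Int) + 1) * c) := lt_irrefl _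
    have h2 : ¬ (((r + (i + 1) : Nat) : Int) < ((r:Nat) : Int)) := by push_cast; omega
    simp
    omega

theorem pvUpdPos (K j : Nat) (hK : 0 < K) :
    PySem.List.pySetD (pvBal K j) ((j % K : Nat) : Int)
        (PySem.List.pyGetD (pvBal K j) ((j % K : Nat) : Int) 0 + 1)
      = pvBal K (j + 1) := by
  have hr : j % K < K := Nat.mod_lt _ hK
  have hdm : K * (j / K) + j % K = j := Nat.div_add_mod j K
  rw [PySem.List.pySetD_natCast, PySem.List.pyGetD_natCast]
  have hget : (pvBal K j).getD (j % K) 0 = ((j / K : Nat) : Int) := by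
    unfold pvBal
    rw [List.getD_eq_getElem?_getD]
    simp [hr]
  rw [hget]
  have harith : ((j + 1) / K = j / K ∧ (j + 1) % K = j % K + 1 ∧ j % K + 1 < K)
      ∨ ((j + 1) / K = j / K + 1 ∧ (j + 1) % K = 0 ∧ j % K + 1 = K) := by
    by_cases hcase : j % K + 1 < K
    · left
      have h1 : j + 1 = (j % K + 1) + K * (j / K) := by omega
      refine ⟨?_, ?_, hcase⟩
      · rw [h1, Nat.add_mul_div_left _ _ hK, Nat.div_eq_of_lt hcase, Nat.zero_add]
      · rw [h1, Nat.add_mul_mod_self_left, Nat.mod_eq_of_lt hcase]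
    · right
      have hKe : j % K + 1 = K := by omega
      have hmul : (j / K + 1) * K = K * (j / K) + K := by ring
      have h1 : j + 1 = (j / K + 1) * K := by omega
      refine ⟨?_, ?_, hKe⟩
      · rw [h1, Nat.mul_div_cancel _ hK]
      · rw [h1, Nat.mul_mod_left]
  apply List.ext_getElem?
  intro n
  unfold pvBal
  by_cases hn : n < K
  · rw [List.getElem?_set]
    simp only [List.length_map, List.length_range, List.getElem?_map, List.getElem?_range,
      if_pos hn, Option.map_some, hn, and_true]
    rcases harith with ⟨hd, hmo, hlt⟩ | ⟨hd, hmo, hKe⟩ <;> rw [hd, hmo] <;>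
      by_cases he : j % K = n
    · rw [if_pos he, if_pos hr, ← he]
      have h3 : j % K < j % K + 1 := Nat.lt_succ_self _
      rw [if_pos h3]
    · rw [if_neg he]
      by_cases h4 : n < j % K
      · rw [if_pos h4, if_pos (by omega : n < j % K + 1)]
      · rw [if_neg h4, if_neg (by omega : ¬ n < j % K + 1)]
    · rw [if_pos he, if_pos hr, ← he]
      have h3 : ¬ (j % K < 0) := Nat.not_lt_zero _
      rw [if_neg h3]
      simp only [Option.some.injEq]
      push_cast
      ring
    · rw [if_neg he]
      have hlt2 : n < j % K := by omega
      have h3 : ¬ (n < 0) := Nat.not_lt_zero _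
      rw [if_pos hlt2, if_neg h3]
      simp only [Option.some.injEq]
      push_cast
      ring
  · rw [List.getElem?_set]
    have h1 : ¬ (j % K = n) := by omega
    simp [hn, h1]

theorem pvFdivNat (k : Int) (hk : 1 ≤ k) (j : Nat) :
    PySem.Int.floordiv (j : Int) k = ((j / k.toNat : Nat) : Int) := by
  unfold PySem.Int.floordiv
  rw [Int.fdiv_eq_ediv, if_pos (Or.inl (by omega)), sub_zero, Int.natCast_div]
  congr 1
  omega

theorem pvPosPhase (k : Int) (hk : 1 ≤ k) (ps : List Int) (hps : ∀ c ∈ ps, 0 < c) :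
    ∀ (j : Nat) (rest : List Int) (acc : Int),
      pvALoop (ps ++ rest) (pvBal k.toNat j) acc
        = pvALoop rest (pvBal k.toNat (j + ps.length))
            (acc + ((PySem.List.enumerate ps (j : Int)).map
                (fun p => (PySem.Int.floordiv p.1 k + 1) * p.2)).sum) := by
  have hK : 0 < k.toNat := by omega
  revert hps
  induction ps with
  | nil => intro _ j rest acc; simp [PySem.List.enumerate]
  | cons c ps' ih =>
    intro hps j rest acc
    have hc : 0 < c := hps c (by simp)
    have hps' : ∀ x ∈ ps', 0 < x := fun x hx => hps x (by simp [hx])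
    rw [List.cons_append]
    simp only [pvALoop, pvStepPos k.toNat j hK c hc, pvUpdPos k.toNat j hK]
    rw [ih hps' (j + 1) rest]
    congr 1
    · congr 1
      simp
      omega
    · rw [PySem.List.enumerate_cons, List.map_cons, List.sum_cons, pvFdivNat k hk j]
      have h2 : PySem.List.enumerate ps' ((j : Int) + 1) = PySem.List.enumerate ps' (((j + 1 : Nat) : Int)) := by
        push_cast
        rfl
      rw [h2]
      push_cast
      ring

theorem pvStepZero (m : Int) (tl : List Int) :
    pvMinPurchase (m :: tl) 0 = some ((m + 1) * 0, 0) := by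
  rw [pvMinPurchase_eq_min2?]
  rw [PySem.List.enumerate_cons, List.map_cons]
  have hshape : ((m + 1) * 0, (0 : Int)) :: (PySem.List.enumerate tl (0 + 1)).map
        (fun p => ((p.2 + 1) * 0, p.1))
      = [] ++ ((m + 1) * 0, (0 : Int)) :: (PySem.List.enumerate tl (0 + 1)).map
        (fun p => ((p.2 + 1) * 0, p.1)) := rfl
  rw [hshape, pvMin2_pre_post]
  · intro x hx
    simp at hx
  · intro x hx
    simp only [List.mem_map] at hx
    obtain ⟨pr, hpr, rfl⟩ := hx
    rw [PySem.List.mem_enumerate_iff] at hpr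
    obtain ⟨i, hi, rfl⟩ := hpr
    simp only [pvBetter]
    simp
    omega

theorem pvUpdHead (m : Int) (tl : List Int) :
    PySem.List.pySetD (m :: tl) 0 (PySem.List.pyGetD (m :: tl) 0 0 + 1) = (m + 1) :: tl := by
  rw [PySem.List.pyGetD_zero_cons]
  rw [(by norm_num : (0:Int) = ((0:Nat):Int)), PySem.List.pySetD_natCast]
  rfl

theorem pvZPhase (zs : List Int) (hzs : ∀ c ∈ zs, c = 0) :
    ∀ (m : Int) (tl : List Int) (acc : Int),
      pvALoop zs (m :: tl) acc = some acc := by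
  revert hzs
  induction zs with
  | nil => intro _ m tl acc; rfl
  | cons c zs' ih =>
    intro hzs m tl acc
    have hc : c = 0 := hzs c (by simp)
    have hzs' : ∀ x ∈ zs', x = 0 := fun x hx => hzs x (by simp [hx])
    subst hc
    simp only [pvALoop, pvStepZero m tl, pvUpdHead]
    rw [ih hzs' (m + 1) tl]
    norm_num

theorem pvSplitDesc (l : List Int) (p : Int → Bool)
    (hp : ∀ a b : Int, b ≤ a → p b = true → p a = true)
    (hl : l.Pairwise (fun a b : Int => b ≤ a)) :
    l = l.filter p ++ l.filter (fun c => !p c) := by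
  induction l with
  | nil => rfl
  | cons a t ih =>
    rw [List.pairwise_cons] at hl
    obtain ⟨ha, ht⟩ := hl
    cases hpa : p a with
    | true =>
      rw [List.filter_cons_of_pos hpa, List.filter_cons_of_neg (by simp [hpa]), List.cons_append]
      exact congrArg (a :: ·) (ih ht)
    | false =>
      have hall : ∀ b ∈ t, p b = false := by
        intro b hb
        cases hpb : p b with
        | false => rfl
        | true => exact absurd (hp a b (ha b hb) hpb) (by simp [hpa])
      have h1 : List.filter p (a :: t) = [] := by
        rw [List.filter_eq_nil_iff]
        intro b hb
        rcases List.mem_cons.mp hb with rfl | hb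
        · simp [hpa]
        · simp [hall b hb]
      have h2 : List.filter (fun c => !p c) (a :: t) = a :: t := by
        rw [List.filter_eq_self]
        intro b hb
        rcases List.mem_cons.mp hb with rfl | hb
        · simp [hpa]
        · simp [hall b hb]
      rw [h1, h2, List.nil_append]

theorem pvBalCons (K j : Nat) (hK : 0 < K) :
    ∃ m tl, pvBal K j = m :: tl := by
  obtain ⟨K', rfl⟩ : ∃ K', K = K' + 1 := ⟨K - 1, by omega⟩
  unfold pvBal
  rw [List.range_succ_eq_map, List.map_cons]
  exact ⟨_, _, rfl⟩

theorem pvBalZero (k : Int) (hk : 1 ≤ k) : PySem.List.pyRepeat [(0:Int)] k = pvBal k.toNat 0 := by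
  rw [PySem.List.pyRepeat_singleton]
  unfold pvBal
  apply List.ext_getElem?
  intro n
  by_cases hn : n < k.toNat
  · simp [List.getElem?_replicate, hn, Nat.zero_mod]
  · simp [List.getElem?_replicate, hn]

theorem pvOnePhase (l : List Int) : ∀ (m acc : Int),
    pvALoop l [m] acc
      = some (acc + ((PySem.List.enumerate l m).map (fun p => (p.1 + 1) * p.2)).sum) := by
  induction l with
  | nil => intro m acc; simp [pvALoop, PySem.List.enumerate]
  | cons c t ih =>
    intro m acc
    have hstep : pvMinPurchase [m] c = some ((m + 1) * c, 0) := by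
      simp [pvMinPurchase, pvPick]
    simp only [pvALoop, hstep, pvUpdHead]
    rw [ih (m + 1) (acc + (m + 1) * c), PySem.List.enumerate_cons, List.map_cons, List.sum_cons]
    congr 1
    ring

-- ===== VERDICT (by name: the statement is the Claim_ definition above) =====
theorem get_minimum_cost_spec : Claim_equal_get_minimum_cost := by
  intro k costs _ hpre
  obtain ⟨hpre1, hpre2⟩ := hpre
  unfold Spec_get_minimum_cost get_minimum_cost get_minimum_cost_alt
  by_cases hnil : costs = []
  · subst hnil
    rfl
  · have hk : 1 ≤ k := hpre1.resolve_left hnil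
    rcases hpre2 with rfl | hnn
    · -- k = 1: a single buyer; A's loop is the closed form directly
      rw [pvBalZero 1 le_rfl]
      have hBal1 : pvBal (1:Int).toNat 0 = [0] := rfl
      rw [hBal1, pvOnePhase, Option.getD_some,
        PySem.List.foldl_add (g := fun p : Int × Int => (PySem.Int.floordiv p.1 1 + 1) * p.2),
        zero_add, zero_add]
      apply congrArg
      apply List.map_congr_left
      intro p hp
      rw [PySem.List.mem_enumerate_iff] at hp
      obtain ⟨i, hi, rfl⟩ := hp
      simp only [zero_add]
      rw [pvFdivNat 1 le_rfl i]
      simp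
    have hK : 0 < k.toNat := by omega
    set s : List Int := PySem.List.sorted costs (fun x => x) true with hs
    set pos : List Int := s.filter (fun c => decide (0 < c)) with hpos
    set zer : List Int := s.filter (fun c => !decide ((0:Int) < c)) with hzer
    have hpair : s.Pairwise (fun a b : Int => b ≤ a) := by
      simpa using PySem.List.sorted_pairwise_rev (xs := costs) (key := fun x => x)
    have hsnn : ∀ c ∈ s, 0 ≤ c := by
      intro c hc
      exact hnn c ((PySem.List.mem_sorted _ _ _ _).mp hc)
    have p2 : s = pos ++ zer :=
      pvSplitDesc s _ (by intro a b hab hb; simp at hb ⊢; omega) hpair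
    have hposel : ∀ c ∈ pos, 0 < c := by
      intro c hc
      rw [hpos, List.mem_filter] at hc
      simpa using hc.2
    have hzel : ∀ c ∈ zer, c = 0 := by
      intro c hc
      rw [hzer, List.mem_filter] at hc
      have h1 := hsnn c hc.1
      have h2 := hc.2
      simp at h2
      omega
    -- A side
    conv_lhs => rw [pvBalZero k hk, p2]
    rw [pvPosPhase k hk pos hposel 0 zer 0]
    simp only [Nat.zero_add]
    obtain ⟨m, tl, hbal⟩ := pvBalCons k.toNat pos.length hK
    rw [hbal, pvZPhase zer hzel m tl]
    rw [Option.getD_some]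
    -- B side
    rw [PySem.List.foldl_add (g := fun p : Int × Int => (PySem.Int.floordiv p.1 k + 1) * p.2)]
    conv_rhs => rw [p2]
    rw [PySem.List.enumerate_append, List.map_append, List.sum_append]
    have hzsum : (List.map (fun p : Int × Int => (PySem.Int.floordiv p.1 k + 1) * p.2)
          (PySem.List.enumerate zer ((0:Int) + pos.length))).sum = 0 := by
      apply List.sum_eq_zero
      intro x hx
      simp only [List.mem_map] at hx
      obtain ⟨pr, hpr, rfl⟩ := hx
      rw [PySem.List.mem_enumerate_iff] at hpr
      obtain ⟨i, hi, rfl⟩ := hpr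
      have hz0 : zer[i] = 0 := hzel _ (List.getElem_mem hi)
      simp [hz0]
    rw [hzsum]
    norm_num
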